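-- pv_equiv track=rewrite | github.com/JQAubs/TetrisAI | TetrisRatGP2.py | numHoles
-- ===== SOURCE A (Python) =====
-- def numHoles(A, ha):
--
--     heights = [0 for _ in range(len(ha))]
--     for x in range(len(heights)):
--         heights[x] = len(A) - ha[x]
--
--     holesInA = 0
--
--     for row in range(len(A)):
--         for col in range(len(A[0])):
--             if heights[col] < row and A[row][col] == 0:
--                 holesInA += 1
--
--     return holesInA
-- ===== SOURCE B (Python) =====
-- def numHoles(A, ha):
--     n = len(A)
--     if n == 0:
--         return 0
--     width = len(A[0])
--     # Stage 1: one pass over the grid building, per column, prefix counts of zeros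
--     # (tolerating ragged rows: a missing cell counts as non-zero).
--     pref = [[0] * width]
--     for row in A:
--         last = pref[-1]
--         pref.append([last[c] + (c < len(row) and row[c] == 0) for c in range(width)])
--     # Stage 2: each column's holes are a prefix-count difference at its clamped surface.
--     total = 0
--     for c in range(width):
--         start = min(max(n - ha[c] + 1, 0), n)
--         total += pref[n][c] - pref[start][c]
--     return total
-- ===== Notes on version B (the rewrite author's own statement) =====
-- stated objective: alternative
-- what changed: B is a two-stage prefix-sum algorithm: one pass over the grid builds per-column prefix counts of zeros, then each column's holes are obtained as a prefix-count difference at the clamped surface index, replacing A's per-cell height-guard scan over the whole grid.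
import Mathlib
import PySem

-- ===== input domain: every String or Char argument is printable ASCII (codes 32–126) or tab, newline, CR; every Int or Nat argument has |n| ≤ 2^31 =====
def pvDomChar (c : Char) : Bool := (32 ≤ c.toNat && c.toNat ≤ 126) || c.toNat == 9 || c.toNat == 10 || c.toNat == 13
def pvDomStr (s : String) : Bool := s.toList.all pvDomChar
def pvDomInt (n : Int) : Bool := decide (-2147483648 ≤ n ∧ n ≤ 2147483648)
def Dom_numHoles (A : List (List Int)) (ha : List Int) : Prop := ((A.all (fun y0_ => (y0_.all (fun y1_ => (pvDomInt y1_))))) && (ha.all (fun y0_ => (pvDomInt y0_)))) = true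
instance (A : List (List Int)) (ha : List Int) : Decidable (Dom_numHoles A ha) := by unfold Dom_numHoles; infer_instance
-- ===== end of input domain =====

-- B replaces A's whole-grid scan with its per-cell height guard by a two-stage
-- prefix-sum algorithm: one pass builds per-column prefix counts of zeros, then each
-- column's holes are a prefix-count difference at the clamped surface; objective: alternative.

-- ===== PORT A =====
def numHoles (A : List (List Int)) (ha : List Int) : Int :=
  let heights : List Int := (List.range ha.length).map (fun x => (A.length : Int) - ha.getD x 0)
  (List.range A.length).foldl (fun acc (row : Nat) =>
    (List.range (A.getD 0 []).length).foldl (fun acc col =>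
      if heights.getD col 0 < (row : Int) ∧ (A.getD row []).getD col 1 = 0 then acc + 1 else acc)
      acc) 0

-- ===== PORT B =====
def numHoles_alt (A : List (List Int)) (ha : List Int) : Int :=
  let n := A.length
  if n = 0 then 0 else
  let width := (A.headD []).length
  -- pref[-1] rendered with getLastD: pref is nonempty throughout the loop
  let pref : List (List Int) := A.foldl (fun pref row =>
      let last := pref.getLastD []
      pref ++ [(List.range width).map (fun c =>
        last.getD c 0 + (if c < row.length ∧ row.getD c 1 = 0 then 1 else 0))])
    [List.replicate width 0]
  (List.range width).foldl (fun total c =>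
    let start : Int := min (max ((n : Int) - ha.getD c 0 + 1) 0) (n : Int)
    total + (pref.getD n []).getD c 0 - (pref.getD start.toNat []).getD c 0) 0

-- ===== PRECONDITION & SPEC =====
-- Pre_ excludes exactly the inputs on which A raises IndexError: a nonempty grid whose
-- first row is wider than ha, or a reachable cell A[row][col] outside its (ragged) row.
def Pre_numHoles (A : List (List Int)) (ha : List Int) : Prop :=
  A = [] ∨ ((A.getD 0 []).length ≤ ha.length ∧
    ∀ r < A.length, ∀ c < (A.getD 0 []).length,
      ((A.length : Int) - ha.getD c 0 < (r : Int) → c < (A.getD r []).length))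
instance (A : List (List Int)) (ha : List Int) : Decidable (Pre_numHoles A ha) := by
  unfold Pre_numHoles; infer_instance

def pvWitness_numHoles : List (List Int) × List Int := ([[1, 0], [0, 0]], [2, 1])

def Spec_numHoles (A : List (List Int)) (ha : List Int) (out : Int) : Prop := out = numHoles_alt A ha
instance (A : List (List Int)) (ha : List Int) (out : Int) : Decidable (Spec_numHoles A ha out) := by unfold Spec_numHoles; infer_instance

-- ===== CLAIM (what is proved, stated in full; the proofs are below) =====
def Claim_equal_numHoles : Prop := ∀ (A : List (List Int)) (ha : List Int), Dom_numHoles A ha → Pre_numHoles A ha → Spec_numHoles A ha (numHoles A ha)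

-- ===== LEMMAS AND PROOFS =====

theorem pv_getD_zero (A : List (List Int)) : A.getD 0 [] = A.headD [] := by
  cases A <;> simp

-- a counting loop as a sum of 0/1 indicators
theorem pv_count_sum {α : Type} (l : List α) (p : α → Prop) [DecidablePred p] (a : Int) :
    l.foldl (fun acc x => if p x then acc + 1 else acc) a
      = a + (l.map (fun x => if p x then (1 : Int) else 0)).sum := by
  induction l generalizing a with
  | nil => simp
  | cons x t ih => simp only [List.foldl_cons, List.map_cons, List.sum_cons, ih]; split_ifs <;> ring

-- ((List.range n).map f).sum as a Finset sum
theorem pv_sum_range (n : ℕ) (f : ℕ → Int) :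
    ((List.range n).map f).sum = ∑ i ∈ Finset.range n, f i := by
  induction n with
  | zero => simp
  | succ m ih => simp [List.range_succ, Finset.sum_range_succ, ih]

-- A's value as a double Finset sum of 0/1 indicators
theorem pv_A_sum (A : List (List Int)) (ha : List Int)
    (hw : (A.getD 0 []).length ≤ ha.length) :
    numHoles A ha =
      ∑ r ∈ Finset.range A.length, ∑ c ∈ Finset.range (A.getD 0 []).length,
        (if (A.length : Int) - ha.getD c 0 < (r : Int) ∧ (A.getD r []).getD c 1 = 0
         then (1 : Int) else 0) := by
  unfold numHoles
  simp only [pv_count_sum]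
  rw [PySem.List.foldl_add
    (g := fun row : Nat => ((List.range (A.getD 0 []).length).map
      (fun col => if ((List.range ha.length).map (fun x => (A.length : Int) - ha.getD x 0)).getD col 0 < (row : Int)
          ∧ (A.getD row []).getD col 1 = 0 then (1 : Int) else 0)).sum),
    zero_add, pv_sum_range]
  refine Finset.sum_congr rfl (fun r _ => ?_)
  rw [pv_sum_range]
  refine Finset.sum_congr rfl (fun c hc => ?_)
  rw [PySem.List.getD_map_range (fun x => (A.length : Int) - ha.getD x 0) ha.length c 0
    (lt_of_lt_of_le (Finset.mem_range.mp hc) hw)]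

-- the per-cell 0/1 indicator of B's prefix pass
def pvInd (row : List Int) (c : ℕ) : Int :=
  if c < row.length ∧ row.getD c 1 = 0 then 1 else 0

-- row i of the prefix table: per-column zero counts over the first i rows
def pvG (rows : List (List Int)) (width i : ℕ) : List Int :=
  (List.range width).map (fun c => ∑ r ∈ Finset.range i, pvInd (rows.getD r []) c)

-- B's fold builds exactly the prefix table [pvG 0, …, pvG n]
theorem pv_pref_spec (width : ℕ) (rows : List (List Int)) :
    rows.foldl (fun pref row =>
        pref ++ [(List.range width).map (fun c =>
          (pref.getLastD []).getD c 0 + (if c < row.length ∧ row.getD c 1 = 0 then 1 else 0))])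
      [List.replicate width 0]
    = (List.range (rows.length + 1)).map (pvG rows width) := by
  induction rows using List.reverseRecOn with
  | nil =>
    simp [pvG]
  | append_singleton rs x ih =>
    rw [List.foldl_append, ih, List.foldl_cons, List.foldl_nil]
    have hG : ∀ i ≤ rs.length, pvG (rs ++ [x]) width i = pvG rs width i := by
      intro i hi
      unfold pvG
      refine List.map_congr_left (fun c _ => ?_)
      refine Finset.sum_congr rfl (fun r hr => ?_)
      have hr' : r < rs.length := lt_of_lt_of_le (Finset.mem_range.mp hr) hi
      rw [List.getD_append _ _ _ _ hr']
    have hmap : (List.range (rs.length + 1)).map (pvG rs width)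
        = (List.range (rs.length + 1)).map (pvG (rs ++ [x]) width) := by
      refine List.map_congr_left (fun i hi => ?_)
      exact (hG i (Nat.lt_succ_iff.mp (List.mem_range.mp hi))).symm
    have hlast : ((List.range (rs.length + 1)).map (pvG rs width)).getLastD []
        = pvG rs width rs.length := by
      rw [List.range_succ, List.map_append]
      simp
    rw [hlast]
    have hnew : (List.range width).map (fun c =>
        (pvG rs width rs.length).getD c 0 + (if c < x.length ∧ x.getD c 1 = 0 then 1 else 0))
        = pvG (rs ++ [x]) width (rs.length + 1) := by
      unfold pvG
      refine List.map_congr_left (fun c hc => ?_)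
      rw [PySem.List.getD_map_range _ width c 0 (List.mem_range.mp hc)]
      rw [Finset.sum_range_succ]
      congr 1
      · exact Finset.sum_congr rfl (fun r hr => by
          rw [List.getD_append _ _ _ _ (Finset.mem_range.mp hr)])
      · simp [pvInd]
    rw [hmap, hnew]
    simp [List.length_append, List.range_succ]

-- prefix-difference as a guarded sum over all rows
theorem pv_diff_sum (f : ℕ → Int) (N s : ℕ) (hs : s ≤ N) :
    (∑ r ∈ Finset.range N, f r) - (∑ r ∈ Finset.range s, f r)
      = ∑ r ∈ Finset.range N, (if s ≤ r then f r else 0) := by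
  rw [← Finset.sum_Ico_eq_sub _ hs]
  rw [Finset.range_eq_Ico, ← Finset.sum_Ico_consecutive
      (fun r => if s ≤ r then f r else 0) (Nat.zero_le s) hs]
  have h0 : ∑ r ∈ Finset.Ico 0 s, (if s ≤ r then f r else 0) = 0 :=
    Finset.sum_eq_zero (fun r hr => by simp [Nat.not_le.mpr (Finset.mem_Ico.mp hr).2])
  rw [h0, zero_add]
  exact (Finset.sum_congr rfl (fun r hr => by simp [(Finset.mem_Ico.mp hr).1])).symm

theorem pvInd_eq_one (row : List Int) (c : ℕ) :
    pvInd row c = 1 ↔ (c < row.length ∧ row.getD c 1 = 0) := by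
  unfold pvInd; split_ifs with h
  · exact ⟨fun _ => h, fun _ => rfl⟩
  · exact ⟨fun h0 => absurd h0 (by norm_num), fun hx => absurd hx h⟩

-- B's value as a double Finset sum (columns outside, rows inside)
theorem pv_B_sum (A : List (List Int)) (ha : List Int) (hA : A ≠ []) :
    numHoles_alt A ha =
      ∑ c ∈ Finset.range (A.headD []).length, ∑ r ∈ Finset.range A.length,
        (if (A.length : Int) - ha.getD c 0 < (r : Int) ∧ pvInd (A.getD r []) c = 1
         then (1 : Int) else 0) := by
  have hn : ¬ A.length = 0 := by simpa using hA
  unfold numHoles_alt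
  simp only [hn, if_false]
  rw [pv_pref_spec]
  set n := A.length with hndef
  set width := (A.headD []).length with hwdef
  have hbody : ∀ (total : Int) (c : ℕ), c ∈ List.range width →
      total + (((List.range (n + 1)).map (pvG A width)).getD n []).getD c 0
        - (((List.range (n + 1)).map (pvG A width)).getD
            (min (max ((n : Int) - ha.getD c 0 + 1) 0) (n : Int)).toNat []).getD c 0
      = total + ∑ r ∈ Finset.range n,
          (if (n : Int) - ha.getD c 0 < (r : Int) ∧ pvInd (A.getD r []) c = 1
           then (1 : Int) else 0) := by
    intro total c hc
    have hcw : c < width := List.mem_range.mp hc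
    set s : Int := min (max ((n : Int) - ha.getD c 0 + 1) 0) (n : Int) with hsdef
    have hs1 : 0 ≤ s := le_min (le_max_right _ _) (Int.natCast_nonneg n)
    have hs2 : s.toNat ≤ n := by omega
    rw [PySem.List.getD_map_range _ (n + 1) n [] (Nat.lt_succ_self n),
        PySem.List.getD_map_range _ (n + 1) s.toNat [] (Nat.lt_succ_of_le hs2)]
    unfold pvG
    rw [PySem.List.getD_map_range _ width c 0 hcw, PySem.List.getD_map_range _ width c 0 hcw]
    rw [add_sub_assoc, pv_diff_sum (fun r => pvInd (A.getD r []) c) n s.toNat hs2]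
    congr 1
    refine Finset.sum_congr rfl (fun r hr => ?_)
    have hrn : r < n := Finset.mem_range.mp hr
    have hiff : s.toNat ≤ r ↔ (n : Int) - ha.getD c 0 < (r : Int) := by omega
    by_cases hg : (n : Int) - ha.getD c 0 < (r : Int)
    · have hle : s.toNat ≤ r := hiff.mpr hg
      simp only [hle, if_true, hg, true_and]
      unfold pvInd
      split_ifs with h01 <;> simp_all
    · have hnle : ¬ s.toNat ≤ r := fun h => hg (hiff.mp h)
      have hx : ¬ ((n : Int) - ha.getD c 0 < (r : Int) ∧ pvInd (A.getD r []) c = 1) :=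
        fun h => hg h.1
      rw [if_neg hnle, if_neg hx]
  rw [PySem.List.foldl_congr_mem
    (l := List.range width)
    (f := fun (total : Int) (c : ℕ) =>
      total + (((List.range (n + 1)).map (pvG A width)).getD n []).getD c 0
        - (((List.range (n + 1)).map (pvG A width)).getD
            (min (max ((n : Int) - ha.getD c 0 + 1) 0) (n : Int)).toNat []).getD c 0)
    (g := fun (total : Int) (c : ℕ) => total + ∑ r ∈ Finset.range n,
      (if (n : Int) - ha.getD c 0 < (r : Int) ∧ pvInd (A.getD r []) c = 1
       then (1 : Int) else 0))
    (init := 0) hbody]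
  rw [PySem.List.foldl_add
    (g := fun c : ℕ => ∑ r ∈ Finset.range n,
      (if (n : Int) - ha.getD c 0 < (r : Int) ∧ pvInd (A.getD r []) c = 1
       then (1 : Int) else 0)), zero_add, pv_sum_range]

-- ===== VERDICT (by name: the statement is the Claim_ definition above) =====
theorem numHoles_spec : Claim_equal_numHoles := by
  intro A ha _ hpre
  unfold Spec_numHoles
  rcases hpre with rfl | ⟨hw, hcell⟩
  · simp [numHoles, numHoles_alt]
  · by_cases hA : A = []
    · subst hA; simp [numHoles, numHoles_alt]
    · rw [pv_A_sum A ha hw, pv_B_sum A ha hA, Finset.sum_comm, ← pv_getD_zero]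
      refine Finset.sum_congr rfl (fun c hc => Finset.sum_congr rfl (fun r hr => ?_))
      have hcw := Finset.mem_range.mp hc
      have hrn := Finset.mem_range.mp hr
      by_cases hg : (A.length : Int) - ha.getD c 0 < (r : Int)
      · have hlen : c < (A.getD r []).length := hcell r hrn c hcw hg
        exact if_congr
          ⟨fun h => ⟨h.1, (pvInd_eq_one _ _).mpr ⟨hlen, h.2⟩⟩,
           fun h => ⟨h.1, ((pvInd_eq_one _ _).mp h.2).2⟩⟩ rfl rfl
      · exact if_congr ⟨fun h => absurd h.1 hg, fun h => absurd h.1 hg⟩ rfl rfl
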